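-- pv_equiv track=rewrite | github.com/sunghyun1999/Algorithm_Study | 프로그래머스/3/150367. 표현 가능한 이진트리/표현 가능한 이진트리.py | solution
-- ===== SOURCE A (Python) =====
-- def solution(numbers):
--     def valid(tree_str: str) -> bool:
--         if len(tree_str) == 1:
--             return True
--         mid = len(tree_str) // 2
--         root = tree_str[mid]
--         left = tree_str[:mid]
--         right = tree_str[mid + 1:]
--         if root == '0' and ('1' in left or '1' in right):
--             return False
--         return valid(left) and valid(right)
--
--     answer = []
--
--     for n in numbers:
--         b = bin(n)[2:]
--         h = 1
--         nodes = (2 ** h) - 1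
--         while nodes < len(b):
--             h += 1
--             nodes = (2 ** h) - 1
--
--         padded = '0' * (nodes - len(b)) + b
--
--         answer.append(1 if valid(padded) else 0)
--
--     return answer
-- ===== SOURCE B (Python) =====
-- def solution(numbers):
--     answer = []
--     for n in numbers:
--         b = bin(n)[2:]
--         h = 1
--         nodes = (2 ** h) - 1
--         while nodes < len(b):
--             h += 1
--             nodes = (2 ** h) - 1
--         padded = '0' * (nodes - len(b)) + b
--
--         # prefix table: pre[i] = number of '1's in padded[:i]
--         pre = [0] * (len(padded) + 1)
--         for i, c in enumerate(padded):
--             pre[i + 1] = pre[i] + (c == '1')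
--
--         # explicit stack of half-open index ranges (lo, hi)
--         ok = True
--         stack = [(0, len(padded))]
--         while stack:
--             lo, hi = stack.pop()
--             if hi - lo <= 1:
--                 continue
--             mid = (lo + hi) // 2
--             if padded[mid] == '0' and pre[hi] - pre[lo] > 0:
--                 ok = False
--                 break
--             stack.append((lo, mid))
--             stack.append((mid + 1, hi))
--
--         answer.append(1 if ok else 0)
--     return answer
-- ===== Notes on version B (the rewrite author's own statement) =====
-- stated objective: alternative
-- what changed: Replaces A's slice-allocating recursive valid (substring copies plus linear '1'-membership scans at every node) by a precomputed prefix-count-of-ones table and an explicit stack of (lo,hi) index ranges, so each node check is O(1) index arithmetic and no substrings are built.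
import Mathlib
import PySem

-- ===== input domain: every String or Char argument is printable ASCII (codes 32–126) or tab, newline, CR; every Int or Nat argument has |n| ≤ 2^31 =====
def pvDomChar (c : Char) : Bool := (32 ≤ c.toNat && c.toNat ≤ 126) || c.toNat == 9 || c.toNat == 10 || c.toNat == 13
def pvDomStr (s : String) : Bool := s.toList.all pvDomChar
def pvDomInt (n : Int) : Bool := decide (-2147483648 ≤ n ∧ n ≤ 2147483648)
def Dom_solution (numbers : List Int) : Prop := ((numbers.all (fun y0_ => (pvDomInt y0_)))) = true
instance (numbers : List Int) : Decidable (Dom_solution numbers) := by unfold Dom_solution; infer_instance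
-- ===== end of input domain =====

-- B replaces A's slice-building recursive `valid` by a prefix-count table plus an
-- explicit stack of index ranges (alternative decomposition, same exact results).

-- shared helpers: both Pythons compute `bin(n)[2:]` and the while-loop padding identically

-- binary digits of a positive Nat, most significant first (empty for 0)
def natBits (n : Nat) : List Char :=
  if n = 0 then [] else natBits (n / 2) ++ [if n % 2 = 1 then '1' else '0']

-- bin(n)[2:] : for n<0 Python gives '-0b…' so [2:] keeps a leading 'b'
def pyBin2 (n : Int) : List Char :=
  if n = 0 then ['0']
  else if 0 < n then natBits n.toNat
  else 'b' :: natBits (-n).toNat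

-- the `while nodes < len(b)` loop; fuel = L suffices since nodes = 2^h-1 grows past L within L steps
def growNodes (fuel h nodes L : Nat) : Nat :=
  match fuel with
  | 0 => nodes
  | fuel + 1 => if nodes < L then growNodes fuel (h + 1) (2 ^ (h + 1) - 1) L else nodes

def paddedOf (n : Int) : List Char :=
  let b := pyBin2 n
  let nodes := growNodes b.length 1 ((2 ^ 1) - 1) b.length
  List.replicate (nodes - b.length) '0' ++ b

-- ===== PORT A =====
-- A's recursive valid over slices; tree_str[mid] is in range whenever length ≥ 2,
-- ported via getD (Python raises only on the empty string, never reached from solution)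
def validA (t : List Char) : Bool :=
  if t.length ≤ 1 then true
  else
    let mid := t.length / 2
    let root := t.getD mid ' '
    let left := t.take mid
    let right := t.drop (mid + 1)
    if root = '0' && (left.contains '1' || right.contains '1') then false
    else validA left && validA right
termination_by t.length
decreasing_by
  · simp_all [List.length_take]
    omega
  · simp_all [List.length_drop]
    omega

def solution (numbers : List Int) : List Int :=
  numbers.foldl (fun answer n =>
    answer ++ [if validA (paddedOf n) then (1 : Int) else 0]) []

-- ===== PORT B =====
-- pre[i] = number of '1's in padded[:i]; built left to right as in Source B
def buildPre (pad : List Char) (acc : Nat) : List Nat :=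
  match pad with
  | [] => [acc]
  | c :: rest => acc :: buildPre rest (acc + (if c = '1' then 1 else 0))

-- the stack loop of Source B; head of the list = top of the stack
def loopB (pad : List Char) (pre : List Nat) (stack : List (Nat × Nat)) : Bool :=
  match stack with
  | [] => true
  | (lo, hi) :: rest =>
    if hi - lo ≤ 1 then loopB pad pre rest
    else
      let mid := (lo + hi) / 2
      if pad.getD mid ' ' = '0' && pre.getD hi 0 - pre.getD lo 0 > 0 then false
      else loopB pad pre ((mid + 1, hi) :: (lo, mid) :: rest)
termination_by (stack.map (fun p => 2 * (p.2 - p.1) + 1)).sum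
decreasing_by
  all_goals simp <;> omega

def solution_alt (numbers : List Int) : List Int :=
  numbers.foldl (fun answer n =>
    let pad := paddedOf n
    let pre := buildPre pad 0
    answer ++ [if loopB pad pre [(0, pad.length)] then (1 : Int) else 0]) []

-- ===== PRECONDITION & SPEC =====
def Spec_solution (numbers : List Int) (out : List Int) : Prop := out = solution_alt numbers
instance (numbers : List Int) (out : List Int) : Decidable (Spec_solution numbers out) := by unfold Spec_solution; infer_instance

-- ===== CLAIM (what is proved, stated in full; the proofs are below) =====
def Claim_equal_solution : Prop := ∀ (numbers : List Int), Dom_solution numbers → Spec_solution numbers (solution numbers)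

-- ===== LEMMAS AND PROOFS =====

theorem buildPre_getD (pad : List Char) (acc i : Nat) (hi : i ≤ pad.length) :
    (buildPre pad acc).getD i 0 = acc + (pad.take i).count '1' := by
  induction pad generalizing acc i with
  | nil =>
      have h0 : i = 0 := by simpa using hi
      subst h0; simp [buildPre]
  | cons c rest ih =>
      cases i with
      | zero => simp [buildPre]
      | succ j =>
          simp only [buildPre, List.getD_cons_succ, List.take_succ_cons, List.count_cons]
          rw [ih _ j (by simpa using hi)]
          by_cases h : c = '1' <;> simp [h] <;> try omega

theorem contains_eq_decide_count (l : List Char) (c : Char) :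
    l.contains c = decide (0 < l.count c) := by
  simp [List.count_pos_iff]

theorem validA_short (t : List Char) (h : t.length ≤ 1) : validA t = true := by
  rw [validA]; simp [h]

theorem validA_split (pad : List Char) (lo hi : Nat) (h2 : lo + 2 ≤ hi) (hlen : hi ≤ pad.length) :
    validA ((pad.drop lo).take (hi - lo)) =
      if pad.getD ((lo + hi) / 2) ' ' = '0' &&
          decide (0 < (buildPre pad 0).getD hi 0 - (buildPre pad 0).getD lo 0) then false
      else validA ((pad.drop lo).take ((lo + hi) / 2 - lo)) &&
           validA ((pad.drop ((lo + hi) / 2 + 1)).take (hi - ((lo + hi) / 2 + 1))) := by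
  set seg := (pad.drop lo).take (hi - lo) with hseg
  have hseglen : seg.length = hi - lo := by simp [hseg]; omega
  have hmid : (lo + hi) / 2 = lo + (hi - lo) / 2 := by omega
  have hdlt : (hi - lo) / 2 < seg.length := by rw [hseglen]; omega
  have hroot : seg.getD ((hi - lo) / 2) ' ' = pad.getD ((lo + hi) / 2) ' ' := by
    simp [hseg, List.getD, List.getElem?_take_of_lt (by omega : (hi - lo) / 2 < hi - lo),
      List.getElem?_drop, hmid]
  have hcnt : (buildPre pad 0).getD hi 0 - (buildPre pad 0).getD lo 0 = seg.count '1' := by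
    rw [buildPre_getD _ _ hi hlen, buildPre_getD _ _ lo (by omega)]
    have h1 : pad.take hi = pad.take lo ++ seg := by
      have h0 : hi = lo + (hi - lo) := by omega
      rw [h0, List.take_add, hseg]
    rw [h1, List.count_append]; omega
  have hleft : seg.take ((hi - lo) / 2) = (pad.drop lo).take ((lo + hi) / 2 - lo) := by
    rw [hseg, List.take_take]; congr 1; omega
  have hright : seg.drop ((hi - lo) / 2 + 1)
      = (pad.drop ((lo + hi) / 2 + 1)).take (hi - ((lo + hi) / 2 + 1)) := by
    have e1 : (hi - lo) - ((hi - lo) / 2 + 1) = hi - ((lo + hi) / 2 + 1) := by omega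
    have e2 : lo + ((hi - lo) / 2 + 1) = (lo + hi) / 2 + 1 := by omega
    rw [hseg, List.drop_take, List.drop_drop, e1, e2]
  have hsplit : seg = seg.take ((hi - lo) / 2)
      ++ seg.getD ((hi - lo) / 2) ' ' :: seg.drop ((hi - lo) / 2 + 1) := by
    conv_lhs => rw [← List.take_append_drop ((hi - lo) / 2) seg]
    rw [List.drop_eq_getElem_cons hdlt, List.getD_eq_getElem _ _ hdlt]
  rw [validA]
  rw [if_neg (show ¬ seg.length ≤ 1 by rw [hseglen]; omega)]
  have hm2 : seg.length / 2 = (hi - lo) / 2 := by rw [hseglen]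
  simp only [hm2, hroot, hcnt, hleft, hright]
  by_cases hr : pad.getD ((lo + hi) / 2) ' ' = '0'
  · have hone :
        ((((pad.drop lo).take ((lo + hi) / 2 - lo)).contains '1')
          || (((pad.drop ((lo + hi) / 2 + 1)).take (hi - ((lo + hi) / 2 + 1))).contains '1'))
        = decide (0 < seg.count '1') := by
      conv_rhs => rw [hsplit, hleft, hright, hroot, hr]
      simp only [List.count_append, List.count_cons]
      rw [Bool.eq_iff_iff]
      simp only [contains_eq_decide_count, Bool.or_eq_true, decide_eq_true_eq]
      simp
    have hcond :
        ((decide (pad.getD ((lo + hi) / 2) ' ' = '0')) &&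
          ((((pad.drop lo).take ((lo + hi) / 2 - lo)).contains '1')
            || (((pad.drop ((lo + hi) / 2 + 1)).take (hi - ((lo + hi) / 2 + 1))).contains '1')))
        = ((decide (pad.getD ((lo + hi) / 2) ' ' = '0')) && decide (0 < seg.count '1')) := by
      rw [hone]
    rw [hcond]
  · have hf : (decide (pad.getD ((lo + hi) / 2) ' ' = '0')) = false := by
      rw [decide_eq_false_iff_not]; exact hr
    rw [hf]
    simp

theorem loopB_eq_all (pad : List Char) (stack : List (Nat × Nat))
    (hs : ∀ p ∈ stack, p.2 ≤ pad.length) :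
    loopB pad (buildPre pad 0) stack
      = stack.all (fun p => validA ((pad.drop p.1).take (p.2 - p.1))) := by
  revert hs
  fun_induction loopB pad (buildPre pad 0) stack with
  | case1 => intro _; simp
  | case2 lo hi rest h ih =>
      intro hs
      rw [ih (fun p hp => hs p (List.mem_cons_of_mem _ hp))]
      have hv : validA ((pad.drop lo).take (hi - lo)) = true := by
        apply validA_short
        simp only [List.length_take]
        omega
      simp [hv]
  | case3 lo hi rest h mid hc =>
      intro hs
      have hmideq : mid = (lo + hi) / 2 := rfl
      simp only [hmideq] at hc
      have hv : validA ((pad.drop lo).take (hi - lo)) = false := by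
        rw [validA_split pad lo hi (by omega) (hs (lo, hi) List.mem_cons_self)]
        rw [if_pos hc]
      simp [hv]
  | case4 lo hi rest h mid hc ih =>
      intro hs
      have hmideq : mid = (lo + hi) / 2 := rfl
      simp only [hmideq] at hc ih ⊢
      have hs' : ∀ p ∈ ((lo + hi) / 2 + 1, hi) :: (lo, (lo + hi) / 2) :: rest, p.2 ≤ pad.length := by
        intro p hp
        simp only [List.mem_cons] at hp
        have hhi := hs (lo, hi) List.mem_cons_self
        rcases hp with rfl | rfl | hp
        · exact hhi
        · simp at hhi ⊢; omega
        · exact hs p (List.mem_cons_of_mem _ hp)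
      rw [ih hs']
      have hv : validA ((pad.drop lo).take (hi - lo))
          = (validA ((pad.drop lo).take ((lo + hi) / 2 - lo)) &&
             validA ((pad.drop ((lo + hi) / 2 + 1)).take (hi - ((lo + hi) / 2 + 1)))) := by
        rw [validA_split pad lo hi (by omega) (hs (lo, hi) List.mem_cons_self)]
        rw [if_neg hc]
      simp only [List.all_cons, hv]
      simp [Bool.and_assoc, Bool.and_comm]

theorem perElem_eq (n : Int) :
    (if validA (paddedOf n) then (1 : Int) else 0)
      = (if loopB (paddedOf n) (buildPre (paddedOf n) 0) [(0, (paddedOf n).length)] then (1 : Int) else 0) := by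
  rw [loopB_eq_all _ _ (by simp)]
  simp

theorem foldl_eq (numbers : List Int) (acc : List Int) :
    numbers.foldl (fun answer n =>
      answer ++ [if validA (paddedOf n) then (1 : Int) else 0]) acc
    = numbers.foldl (fun answer n =>
      let pad := paddedOf n
      let pre := buildPre pad 0
      answer ++ [if loopB pad pre [(0, pad.length)] then (1 : Int) else 0]) acc := by
  induction numbers generalizing acc with
  | nil => rfl
  | cons x xs ih => simp only [List.foldl_cons]; rw [perElem_eq x]; exact ih _

-- ===== VERDICT (by name: the statement is the Claim_ definition above) =====
theorem solution_spec : Claim_equal_solution := by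
  intro numbers _
  unfold Spec_solution solution solution_alt
  exact foldl_eq numbers []
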